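-- pv_equiv track=rewrite | github.com/anjizhao/advent-of-code-2020 | day9/xmas.py | valid_next_number
-- ===== SOURCE A (Python) =====
-- def valid_next_number(previous_numbers, this_number):
--     prev_set = set(previous_numbers)
--     for p in previous_numbers:
--         prev_set.remove(p)
--         if this_number - p in prev_set:
--             return True
--         prev_set.add(p)
--     return False
-- ===== SOURCE B (Python) =====
-- def valid_next_number(previous_numbers, this_number):
--     vals = sorted(set(previous_numbers))
--     lo, hi = 0, len(vals) - 1
--     while lo < hi:
--         s = vals[lo] + vals[hi]
--         if s == this_number:
--             return True
--         elif s < this_number: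
--             lo += 1
--         else:
--             hi -= 1
--     return False
-- ===== Notes on version B (the rewrite author's own statement) =====
-- stated objective: alternative
-- what changed: Replaced A's scan with per-element set remove/lookup/re-add by sorting the distinct values once and running a two-pointer sweep from both ends (lo<hi keeps the two summands distinct, matching A).
import Mathlib
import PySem

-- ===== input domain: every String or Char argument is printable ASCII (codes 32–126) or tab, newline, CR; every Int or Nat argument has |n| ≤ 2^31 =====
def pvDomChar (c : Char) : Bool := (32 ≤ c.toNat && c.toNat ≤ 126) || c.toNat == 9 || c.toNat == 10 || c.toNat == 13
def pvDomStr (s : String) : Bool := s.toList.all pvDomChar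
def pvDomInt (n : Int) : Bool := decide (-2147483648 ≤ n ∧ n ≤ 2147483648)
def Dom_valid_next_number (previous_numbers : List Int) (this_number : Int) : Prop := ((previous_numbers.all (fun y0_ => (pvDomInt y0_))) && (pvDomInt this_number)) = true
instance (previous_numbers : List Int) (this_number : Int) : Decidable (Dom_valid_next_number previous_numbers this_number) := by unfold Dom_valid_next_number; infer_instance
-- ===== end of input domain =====

-- B replaces A's per-element set remove/lookup/re-add scan by a two-pointer sweep over the
-- sorted distinct values (lo<hi keeps the two summands distinct values, matching A); alternative, not claimed faster.

-- ===== PORT A =====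
-- loop body of A: remove p, test membership of this_number - p, re-add p, early return on hit
def pvGoA (this_number : Int) (prev_set : PySem.Set Int) : List Int → Bool
  | [] => false
  | p :: rest =>
    match PySem.Set.remove? prev_set p with
    | none => false  -- unreachable: p is an element of the list prev_set was built from
    | some s' =>
      if PySem.Set.contains s' (this_number - p) then true
      else pvGoA this_number (PySem.Set.add s' p) rest

def valid_next_number (previous_numbers : List Int) (this_number : Int) : Bool :=
  pvGoA this_number (PySem.Set.ofList previous_numbers) previous_numbers

-- ===== PORT B =====
-- while lo < hi: compare vals[lo] + vals[hi] with the target, move one pointer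
def pvTwoPtr (vals : List Int) (this_number : Int) (lo hi : Nat) : Bool :=
  if _h : lo < hi then
    let s := vals.getD lo 0 + vals.getD hi 0
    if s = this_number then true
    else if s < this_number then pvTwoPtr vals this_number (lo + 1) hi
    else pvTwoPtr vals this_number lo (hi - 1)
  else false
termination_by hi - lo

def valid_next_number_alt (previous_numbers : List Int) (this_number : Int) : Bool :=
  let vals := PySem.List.sorted (PySem.Set.ofList previous_numbers) (fun x => x) false
  pvTwoPtr vals this_number 0 (vals.length - 1)

-- ===== PRECONDITION & SPEC =====
def Spec_valid_next_number (previous_numbers : List Int) (this_number : Int) (out : Bool) : Prop := out = valid_next_number_alt previous_numbers this_number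
instance (previous_numbers : List Int) (this_number : Int) (out : Bool) : Decidable (Spec_valid_next_number previous_numbers this_number out) := by unfold Spec_valid_next_number; infer_instance

-- ===== CLAIM (what is proved, stated in full; the proofs are below) =====
def Claim_equal_valid_next_number : Prop := ∀ (previous_numbers : List Int) (this_number : Int), Dom_valid_next_number previous_numbers this_number → Spec_valid_next_number previous_numbers this_number (valid_next_number previous_numbers this_number)

-- ===== LEMMAS AND PROOFS =====

-- common specification: the target is the sum of two distinct values of the list
def pvHasPair (l : List Int) (t : Int) : Prop := ∃ x ∈ l, ∃ y ∈ l, x ≠ y ∧ x + y = t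

-- A's loop, under the invariant that the set is duplicate-free and contains the remaining elements
lemma pvGoA_iff (t : Int) (rest : List Int) : ∀ (s : List Int), s.Nodup →
    (∀ p ∈ rest, p ∈ s) →
    (pvGoA t s rest = true ↔ ∃ p ∈ rest, t - p ∈ s ∧ t - p ≠ p) := by
  induction rest with
  | nil => intro s _ _; simp [pvGoA]
  | cons p rest ih =>
    intro s hnd hsub
    have hp : p ∈ s := hsub p (List.mem_cons_self ..)
    have hrem := PySem.Set.remove?_of_mem hp
    have hmem : ∀ x, x ∈ PySem.Set.add (PySem.Set.discard s p) p ↔ x ∈ s := by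
      intro x
      rw [PySem.Set.mem_add, PySem.Set.mem_discard]
      constructor
      · rintro (⟨h, _⟩ | rfl)
        · exact h
        · exact hp
      · intro h
        by_cases hx : x = p
        · exact Or.inr hx
        · exact Or.inl ⟨h, hx⟩
    have hnd' : (PySem.Set.add (PySem.Set.discard s p) p).Nodup :=
      PySem.Set.nodup_add _ _ (PySem.Set.nodup_discard _ _ hnd)
    have hsub' : ∀ q ∈ rest, q ∈ PySem.Set.add (PySem.Set.discard s p) p := by
      intro q hq; exact (hmem q).mpr (hsub q (List.mem_cons_of_mem _ hq))
    rw [pvGoA, hrem]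
    dsimp only
    by_cases hc : PySem.Set.contains (PySem.Set.discard s p) (t - p) = true
    · rw [if_pos hc]
      have := (PySem.Set.contains_iff _ _).mp hc
      rw [PySem.Set.mem_discard] at this
      simp only [true_iff]
      exact ⟨p, List.mem_cons_self .., this⟩
    · rw [if_neg hc]
      rw [ih _ hnd' hsub']
      have hnotp : ¬ (t - p ∈ s ∧ t - p ≠ p) := by
        intro h
        exact hc ((PySem.Set.contains_iff _ _).mpr ((PySem.Set.mem_discard _ _ _).mpr h))
      simp only [hmem]
      constructor
      · rintro ⟨q, hq, h⟩; exact ⟨q, List.mem_cons_of_mem _ hq, h⟩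
      · rintro ⟨q, hq, h⟩
        rcases List.mem_cons.mp hq with rfl | hq'
        · exact absurd h hnotp
        · exact ⟨q, hq', h⟩

lemma pvA_iff (l : List Int) (t : Int) :
    valid_next_number l t = true ↔ pvHasPair l t := by
  unfold valid_next_number
  rw [pvGoA_iff t l (PySem.Set.ofList l) (PySem.Set.nodup_ofList l)
      (fun p hp => (PySem.Set.mem_ofList l p).mpr hp)]
  constructor
  · rintro ⟨p, hp, hq, hne⟩
    exact ⟨t - p, (PySem.Set.mem_ofList l _).mp hq, p, hp, hne, by ring⟩
  · rintro ⟨x, hx, y, hy, hxy, hsum⟩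
    refine ⟨y, hy, ?_, ?_⟩
    · rw [show t - y = x by omega]; exact (PySem.Set.mem_ofList l x).mpr hx
    · rw [show t - y = x by omega]; exact hxy

-- B's two-pointer loop on a strictly increasing list
lemma pvTwoPtr_iff (vals : List Int) (t : Int)
    (hs : vals.Pairwise (· < ·)) : ∀ (n lo hi : Nat), hi - lo = n → hi < vals.length →
    (pvTwoPtr vals t lo hi = true ↔
      ∃ i j, lo ≤ i ∧ i < j ∧ j ≤ hi ∧ vals.getD i 0 + vals.getD j 0 = t) := by
  have hmono : ∀ i j : Nat, i ≤ j → j < vals.length → vals.getD i 0 ≤ vals.getD j 0 := by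
    intro i j hij hj
    rcases Nat.lt_or_ge i j with h | h
    · rw [List.getD_eq_getElem _ _ (by omega), List.getD_eq_getElem _ _ hj]
      exact le_of_lt (List.pairwise_iff_getElem.mp hs i j (by omega) hj h)
    · have : i = j := by omega
      rw [this]
  intro n
  induction n with
  | zero =>
    intro lo hi hn hhi
    have hnl : ¬ lo < hi := by omega
    rw [pvTwoPtr, dif_neg hnl]
    constructor
    · intro h; exact absurd h (by decide)
    · rintro ⟨i, j, h1, h2, h3, _⟩
      exact absurd h3 (by omega)
  | succ n ih =>
    intro lo hi hn hhi
    have hlt : lo < hi := by omega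
    rw [pvTwoPtr, dif_pos hlt]
    show (if vals.getD lo 0 + vals.getD hi 0 = t then true
      else if vals.getD lo 0 + vals.getD hi 0 < t then pvTwoPtr vals t (lo + 1) hi
      else pvTwoPtr vals t lo (hi - 1)) = true ↔ _
    by_cases he : vals.getD lo 0 + vals.getD hi 0 = t
    · rw [if_pos he]
      simp only [true_iff]
      exact ⟨lo, hi, le_refl _, hlt, le_refl _, he⟩
    · rw [if_neg he]
      by_cases hl : vals.getD lo 0 + vals.getD hi 0 < t
      · rw [if_pos hl, ih (lo + 1) hi (by omega) hhi]
        constructor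
        · rintro ⟨i, j, h1, h2, h3, h4⟩
          exact ⟨i, j, by omega, h2, h3, h4⟩
        · rintro ⟨i, j, h1, h2, h3, h4⟩
          refine ⟨i, j, ?_, h2, h3, h4⟩
          rcases Nat.lt_or_ge lo i with h | h
          · omega
          · exfalso
            have hieq : i = lo := by omega
            subst hieq
            have : vals.getD j 0 ≤ vals.getD hi 0 := hmono j hi h3 hhi
            omega
      · rw [if_neg hl, ih lo (hi - 1) (by omega) (by omega)]
        constructor
        · rintro ⟨i, j, h1, h2, h3, h4⟩
          exact ⟨i, j, h1, h2, by omega, h4⟩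
        · rintro ⟨i, j, h1, h2, h3, h4⟩
          refine ⟨i, j, h1, h2, ?_, h4⟩
          rcases Nat.lt_or_ge j hi with h | h
          · omega
          · exfalso
            have hjeq : j = hi := by omega
            subst hjeq
            have : vals.getD lo 0 ≤ vals.getD i 0 := hmono lo i h1 (by omega)
            omega

lemma pvB_iff (l : List Int) (t : Int) :
    valid_next_number_alt l t = true ↔ pvHasPair l t := by
  unfold valid_next_number_alt
  simp only []
  have hpair : (PySem.List.sorted (PySem.Set.ofList l) (fun x => x) false).Pairwise (· < ·) :=
    PySem.List.sorted_ofList_pairwise_lt l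
  set vals := PySem.List.sorted (PySem.Set.ofList l) (fun x => x) false with hv
  have hmem : ∀ x, x ∈ vals ↔ x ∈ l := by
    intro x
    rw [hv, PySem.List.mem_sorted, PySem.Set.mem_ofList]
  by_cases hnil : vals = []
  · rw [hnil, pvTwoPtr, dif_neg (by simp : ¬ (0 : Nat) < ([] : List Int).length - 1)]
    constructor
    · intro h; exact absurd h (by decide)
    · rintro ⟨x, hx, _⟩
      have hxv : x ∈ vals := (hmem x).mpr hx
      rw [hnil] at hxv
      exact absurd hxv (List.not_mem_nil)
  · have hlen : 0 < vals.length := List.length_pos_iff.mpr hnil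
    rw [pvTwoPtr_iff vals t hpair (vals.length - 1) 0 (vals.length - 1) rfl (by omega)]
    constructor
    · rintro ⟨i, j, _, hij, hj, hsum⟩
      have hjlen : j < vals.length := by omega
      have hilen : i < vals.length := by omega
      rw [List.getD_eq_getElem _ _ hilen, List.getD_eq_getElem _ _ hjlen] at hsum
      exact ⟨vals[i], (hmem _).mp (List.getElem_mem _), vals[j], (hmem _).mp (List.getElem_mem _),
        ne_of_lt (List.pairwise_iff_getElem.mp hpair i j hilen hjlen hij), hsum⟩
    · rintro ⟨x, hx, y, hy, hxy, hsum⟩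
      obtain ⟨i, hi, hix⟩ := List.mem_iff_getElem.mp ((hmem x).mpr hx)
      obtain ⟨j, hj, hjy⟩ := List.mem_iff_getElem.mp ((hmem y).mpr hy)
      have hne : i ≠ j := by
        rintro rfl
        exact hxy (hix ▸ hjy ▸ rfl)
      rcases Nat.lt_or_ge i j with h | h
      · exact ⟨i, j, Nat.zero_le _, h, by omega,
          by rw [List.getD_eq_getElem _ _ hi, List.getD_eq_getElem _ _ hj, hix, hjy]; exact hsum⟩
      · exact ⟨j, i, Nat.zero_le _, by omega, by omega,
          by rw [List.getD_eq_getElem _ _ hj, List.getD_eq_getElem _ _ hi, hjy, hix]; omega⟩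

-- ===== VERDICT (by name: the statement is the Claim_ definition above) =====
theorem valid_next_number_spec : Claim_equal_valid_next_number := by
  intro l t _
  unfold Spec_valid_next_number
  exact Bool.eq_iff_iff.mpr ((pvA_iff l t).trans (pvB_iff l t).symm)
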